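-- pv_equiv track=rewrite | github.com/UnB-KnEDLe/experiments | members/ciriatico/metaflow/cnn_cnn_lstm/CNN_CNN_LSTM_process_data.py | create_char2idx_dict
-- ===== SOURCE A (Python) =====
-- def create_char2idx_dict(train_set):
--     dic = {'<PAD>': 0, '<UNK>': 1, '<START>': 2, '<END>': 3}
--     for line in train_set:
--         if line == '\n':
--             continue
--         word = line.split()[0]
--         for char in word:
--             if char not in dic:
--                 dic[char] = len(dic)
--     return dic
-- ===== SOURCE B (Python) =====
-- def create_char2idx_dict(train_set):
--     chars = []
--     for line in train_set:
--         if line != '\n':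
--             chars.extend(line.split()[0])
--     dic = {'<PAD>': 0, '<UNK>': 1, '<START>': 2, '<END>': 3}
--     for rank, c in enumerate(sorted(set(chars), key=chars.index), start=4):
--         dic[c] = rank
--     return dic
-- ===== Notes on version B (the rewrite author's own statement) =====
-- stated objective: alternative
-- what changed: A assigns indices in one fused scan that inserts into the dict while reading len(dic); B first collects all first-word characters into a flat list, then recovers the insertion order by sorting the character SET by first-occurrence position (key=chars.index) and numbering the sorted list from 4 — a sort-by-key algorithm instead of sequential dedup-with-counter.
import Mathlib
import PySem

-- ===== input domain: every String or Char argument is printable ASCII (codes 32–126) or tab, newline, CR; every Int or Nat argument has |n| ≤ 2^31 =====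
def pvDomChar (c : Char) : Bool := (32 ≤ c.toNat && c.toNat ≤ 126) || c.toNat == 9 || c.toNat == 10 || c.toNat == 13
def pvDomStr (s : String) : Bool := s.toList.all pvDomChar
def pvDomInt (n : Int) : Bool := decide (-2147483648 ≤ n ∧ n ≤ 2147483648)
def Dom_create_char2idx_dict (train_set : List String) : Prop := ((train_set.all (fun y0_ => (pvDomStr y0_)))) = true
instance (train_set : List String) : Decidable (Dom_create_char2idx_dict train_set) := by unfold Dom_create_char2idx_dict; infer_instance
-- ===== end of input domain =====

-- B replaces A's fused scan (insert while reading len(dic)) by: flatten the first-word characters,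
-- then sort the character SET by first-occurrence position (key=chars.index) and number it from 4
-- (objective: alternative — a sort-by-key algorithm instead of sequential dedup-with-counter).

-- ===== PORT A =====
-- inner loop body: 'if char not in dic: dic[char] = len(dic)'
def pvAChar (dic : PySem.Dict String Int) (c : Char) : PySem.Dict String Int :=
  if dic.contains (String.ofList [c]) then dic
  else dic.insert (String.ofList [c]) (dic.size : Int)

-- one iteration of 'for line in train_set'
def pvALine (dic : PySem.Dict String Int) (line : String) : PySem.Dict String Int :=
  if line == "\n" then dic
  else
    match PySem.List.pyGet? (PySem.Str.split₀ line) 0 with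
    | none => dic      -- line.split()[0] raises IndexError here; excluded by Pre_
    | some word => word.toList.foldl pvAChar dic

def create_char2idx_dict (train_set : List String) : List (String × Int) :=
  (train_set.foldl pvALine
    (PySem.Dict.ofList [("<PAD>", 0), ("<UNK>", 1), ("<START>", 2), ("<END>", 3)])).items

-- ===== PORT B =====
-- characters of line.split()[0]
def pvWordChars (line : String) : List Char :=
  match PySem.List.pyGet? (PySem.Str.split₀ line) 0 with
  | none => []       -- line.split()[0] raises IndexError here; excluded by Pre_
  | some w => w.toList

-- 'chars.index(c)' as the sort key (total here: the key is only applied to members of chars)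
def pvIdxKey (chars : List Char) (c : Char) : Int :=
  (((PySem.List.index? chars c).getD 0 : Nat) : Int)

-- 'for rank, c in enumerate(..., start=4): dic[c] = rank'
def pvRankStep (p : PySem.Dict String Int × Int) (c : Char) : PySem.Dict String Int × Int :=
  (p.1.insert (String.ofList [c]) p.2, p.2 + 1)

def create_char2idx_dict_alt (train_set : List String) : List (String × Int) :=
  let chars := train_set.foldl
    (fun acc line => if line == "\n" then acc else acc ++ pvWordChars line) []
  -- sorted(set(chars), key=chars.index): the key is injective on the set, so the Python
  -- result does not depend on set iteration order and the PySem.Set port is exact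
  let ordered := PySem.List.sorted (PySem.Set.ofList chars) (pvIdxKey chars) false
  ((ordered.foldl pvRankStep
    (PySem.Dict.ofList [("<PAD>", 0), ("<UNK>", 1), ("<START>", 2), ("<END>", 3)], 4)).1).items

-- ===== PRECONDITION & SPEC =====
-- Pre_ excludes exactly the inputs where a line other than '\n' is empty or whitespace-only:
-- there line.split()[0] raises IndexError in both A and B.
def Pre_create_char2idx_dict (train_set : List String) : Prop :=
  ∀ line ∈ train_set, line = "\n" ∨ PySem.Str.split₀ line ≠ []
instance (train_set : List String) : Decidable (Pre_create_char2idx_dict train_set) := by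
  unfold Pre_create_char2idx_dict; infer_instance

def pvWitness_create_char2idx_dict : List String := ["ab c", "\n", "ba"]

def Spec_create_char2idx_dict (train_set : List String) (out : List (String × Int)) : Prop := out = create_char2idx_dict_alt train_set
instance (train_set : List String) (out : List (String × Int)) : Decidable (Spec_create_char2idx_dict train_set out) := by unfold Spec_create_char2idx_dict; infer_instance

-- ===== CLAIM (what is proved, stated in full; the proofs are below) =====
def Claim_equal_create_char2idx_dict : Prop := ∀ (train_set : List String), Dom_create_char2idx_dict train_set → Pre_create_char2idx_dict train_set → Spec_create_char2idx_dict train_set (create_char2idx_dict train_set)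

-- ===== LEMMAS AND PROOFS =====

-- the dict A's loop carries, expressed as base ++ chars numbered from 4
def pvEnumFrom : Int → List Char → List (String × Int)
  | _, [] => []
  | i, c :: cs => (String.ofList [c], i) :: pvEnumFrom (i + 1) cs

def pvDictOf (s : List Char) : PySem.Dict String Int :=
  PySem.Dict.mk ([("<PAD>", 0), ("<UNK>", 1), ("<START>", 2), ("<END>", 3)] ++ pvEnumFrom 4 s)

theorem pvSingleton_inj {a b : Char} (h : String.ofList [a] = String.ofList [b]) : a = b := by
  have := congrArg String.toList h; simpa using this

theorem pvEnumFrom_map_fst (s : List Char) : ∀ i, (pvEnumFrom i s).map (·.1) = s.map (fun c => String.ofList [c]) := by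
  induction s with
  | nil => intro i; rfl
  | cons c cs ih => intro i; simp [pvEnumFrom, ih]

theorem pvEnumFrom_length (s : List Char) : ∀ i, (pvEnumFrom i s).length = s.length := by
  induction s with
  | nil => intro i; rfl
  | cons c cs ih => intro i; simp [pvEnumFrom, ih]

theorem pvEnumFrom_append (s : List Char) (c : Char) : ∀ i, pvEnumFrom i (s ++ [c]) = pvEnumFrom i s ++ [(String.ofList [c], i + s.length)] := by
  induction s with
  | nil => intro i; simp [pvEnumFrom]
  | cons d ds ih =>
      intro i
      simp only [List.cons_append, pvEnumFrom, ih (i + 1), List.length_cons]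
      have hc : i + 1 + (ds.length : Int) = i + ((ds.length + 1 : Nat) : Int) := by push_cast; ring
      rw [hc]

theorem pvContains_dictOf (s : List Char) (c : Char) :
    (pvDictOf s).contains (String.ofList [c]) = decide (c ∈ s) := by
  rw [PySem.Dict.contains_eq_decide_mem_keys]
  have hk : (pvDictOf s).keys
      = ["<PAD>", "<UNK>", "<START>", "<END>"] ++ (pvEnumFrom 4 s).map (·.1) := rfl
  rw [hk, pvEnumFrom_map_fst]
  have hne : ∀ t : String, t.toList.length ≠ 1 → String.ofList [c] ≠ t := by
    intro t ht heq
    exact ht (by rw [← heq]; simp)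
  by_cases h : c ∈ s
  · have hx : ∃ a ∈ s, String.ofList [a] = String.ofList [c] := ⟨c, h, rfl⟩
    simp [h, hx]
  · have hm : String.ofList [c] ∉ s.map (fun d => String.ofList [d]) := by
      intro hmem
      obtain ⟨d, hd, heq⟩ := List.mem_map.mp hmem
      exact h (pvSingleton_inj heq.symm ▸ hd)
    simp only [h, decide_false]
    simp only [List.mem_append, List.mem_cons, List.not_mem_nil, or_false, decide_eq_false_iff_not,
      not_or]
    refine ⟨⟨hne _ (by decide), hne _ (by decide), hne _ (by decide), hne _ (by decide)⟩, hm⟩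

theorem pvSize_dictOf (s : List Char) : ((pvDictOf s).size : Int) = 4 + (s.length : Int) := by
  show ((([("<PAD>", 0), ("<UNK>", 1), ("<START>", 2), ("<END>", 3)] : List (String × Int))
      ++ pvEnumFrom 4 s).length : Int) = 4 + (s.length : Int)
  rw [List.length_append, pvEnumFrom_length]
  norm_num [List.length_cons]

theorem pvInsert_fresh_dictOf (s : List Char) (c : Char) (h : c ∉ s) (i : Int)
    (hi : i = 4 + (s.length : Int)) :
    (pvDictOf s).insert (String.ofList [c]) i = pvDictOf (s ++ [c]) := by
  apply PySem.Dict.ext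
  rw [PySem.Dict.items_insert_of_not_contains _ _ (by rw [pvContains_dictOf]; simp [h])]
  show ([("<PAD>", 0), ("<UNK>", 1), ("<START>", 2), ("<END>", 3)] ++ pvEnumFrom 4 s)
      ++ [(String.ofList [c], i)]
    = [("<PAD>", 0), ("<UNK>", 1), ("<START>", 2), ("<END>", 3)] ++ pvEnumFrom 4 (s ++ [c])
  rw [pvEnumFrom_append s c 4, List.append_assoc, hi]

-- ----- A-side: the fused scan computes pvDictOf (dedup of the flattened chars) -----

theorem pvAChar_dictOf (s : List Char) (c : Char) :
    pvAChar (pvDictOf s) c = pvDictOf (PySem.Set.add s c) := by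
  unfold pvAChar
  rw [pvContains_dictOf]
  by_cases h : c ∈ s
  · rw [PySem.Set.add_of_mem h]; simp [h]
  · simp only [h, decide_false, Bool.false_eq_true, if_false]
    rw [PySem.Set.add_of_not_mem h, pvInsert_fresh_dictOf s c h _ (pvSize_dictOf s)]

theorem pvFoldl_aChar (w : List Char) : ∀ s : List Char,
    w.foldl pvAChar (pvDictOf s) = pvDictOf (PySem.Set.update s w) := by
  induction w with
  | nil => intro s; simp [PySem.Set.update_nil]
  | cons c cs ih =>
      intro s
      rw [List.foldl_cons, pvAChar_dictOf, ih, PySem.Set.update_cons]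

theorem pvALine_eq (dic : PySem.Dict String Int) (line : String) :
    pvALine dic line = if line == "\n" then dic else (pvWordChars line).foldl pvAChar dic := by
  unfold pvALine pvWordChars
  cases PySem.List.pyGet? (PySem.Str.split₀ line) 0 <;> simp

theorem pvOuter (ts : List String) : ∀ s : List Char,
    ts.foldl pvALine (pvDictOf s)
      = pvDictOf (PySem.Set.update s ((ts.filter (fun l => !(l == "\n"))).flatMap pvWordChars)) := by
  induction ts with
  | nil => intro s; simp [PySem.Set.update_nil]
  | cons line rest ih =>
      intro s
      rw [List.foldl_cons, pvALine_eq]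
      by_cases h : line = "\n"
      · simp [h, ih]
      · have hb : (line == "\n") = false := by simp [h]
        rw [hb]
        simp only [Bool.false_eq_true, if_false]
        have hf : List.filter (fun l => !(l == "\n")) (line :: rest)
            = line :: List.filter (fun l => !(l == "\n")) rest := by simp [hb]
        rw [hf, List.flatMap_cons, pvFoldl_aChar, ih, PySem.Set.update_append]

theorem pvBase_eq : PySem.Dict.ofList [(("<PAD>" : String), (0 : Int)), ("<UNK>", 1), ("<START>", 2), ("<END>", 3)] = pvDictOf [] := by
  decide

-- ----- B-side -----

-- B's collection loop flattens the first words' characters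
theorem pvCollect_eq (ts : List String) : ∀ acc : List Char,
    ts.foldl (fun acc line => if line == "\n" then acc else acc ++ pvWordChars line) acc
      = acc ++ (ts.filter (fun l => !(l == "\n"))).flatMap pvWordChars := by
  induction ts with
  | nil => intro acc; simp
  | cons line rest ih =>
      intro acc
      rw [List.foldl_cons]
      by_cases h : line = "\n"
      · rw [if_pos (by simp [h]), ih,
          show List.filter (fun l => !(l == "\n")) (line :: rest)
              = List.filter (fun l => !(l == "\n")) rest by simp [h]]
      · rw [if_neg (by simp [h]), ih,
          show List.filter (fun l => !(l == "\n")) (line :: rest)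
              = line :: List.filter (fun l => !(l == "\n")) rest by simp [h],
          List.flatMap_cons, List.append_assoc]

-- set(chars) in first-occurrence order is strictly increasing under chars.index
theorem pvOfList_pairwise (xs : List Char) :
    (PySem.Set.ofList xs).Pairwise (fun a b => pvIdxKey xs a < pvIdxKey xs b) := by
  induction xs using List.reverseRecOn with
  | nil => simp [PySem.Set.ofList]
  | append_singleton xs c ih =>
      have hof : PySem.Set.ofList (xs ++ [c]) = PySem.Set.add (PySem.Set.ofList xs) c := by
        rw [PySem.Set.ofList_eq_foldl, PySem.Set.ofList_eq_foldl, List.foldl_append]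
        rfl
      have hkeep : ∀ a ∈ xs, pvIdxKey (xs ++ [c]) a = pvIdxKey xs a := by
        intro a ha
        unfold pvIdxKey
        rw [PySem.List.index?_append_of_mem _ ha]
      by_cases hc : c ∈ xs
      · rw [hof, PySem.Set.add_of_mem (by rw [PySem.Set.mem_ofList]; exact hc)]
        refine ih.imp_of_mem ?_
        intro a b ha hb h
        have ha' := (PySem.Set.mem_ofList _ _).mp ha
        have hb' := (PySem.Set.mem_ofList _ _).mp hb
        rw [hkeep a ha', hkeep b hb']; exact h
      · rw [hof, PySem.Set.add_of_not_mem (by rw [PySem.Set.mem_ofList]; exact hc)]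
        rw [List.pairwise_append]
        refine ⟨?_, by simp, ?_⟩
        · refine ih.imp_of_mem ?_
          intro a b ha hb h
          have ha' := (PySem.Set.mem_ofList _ _).mp ha
          have hb' := (PySem.Set.mem_ofList _ _).mp hb
          rw [hkeep a ha', hkeep b hb']; exact h
        · intro a ha b hb
          have ha' := (PySem.Set.mem_ofList _ _).mp ha
          have hb' : b = c := by simpa using hb
          rw [hb']
          rw [hkeep a ha']
          obtain ⟨k, hk⟩ := Option.isSome_iff_exists.mp
            ((PySem.List.index?_isSome_iff xs a).mpr ha')
          obtain ⟨hklt, -, -⟩ := PySem.List.getElem_of_index?_eq_some hk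
          unfold pvIdxKey
          rw [PySem.List.index?_append_singleton_self xs c hc, hk]
          simp only [Option.getD_some]
          exact_mod_cast hklt

-- sorting set(chars) by chars.index reproduces first-occurrence order
theorem pvSorted_eq (chars : List Char) :
    PySem.List.sorted (PySem.Set.ofList chars) (pvIdxKey chars) false = PySem.Set.ofList chars :=
  PySem.List.sorted_eq_of_perm_of_pairwise_lt _ _ _ (List.Perm.refl _) (pvOfList_pairwise chars)

-- the rank loop over fresh distinct characters builds pvDictOf
theorem pvRankLoop (t : List Char) : ∀ s : List Char, t.Nodup → (∀ c ∈ t, c ∉ s) →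
    (t.foldl pvRankStep (pvDictOf s, 4 + (s.length : Int))).1 = pvDictOf (s ++ t) := by
  induction t with
  | nil => intro s _ _; simp
  | cons c cs ih =>
      intro s hnd hfresh
      have hc : c ∉ s := hfresh c (by simp)
      have h1 : pvRankStep (pvDictOf s, 4 + (s.length : Int)) c
          = (pvDictOf (s ++ [c]), 4 + ((s ++ [c]).length : Int)) := by
        unfold pvRankStep
        rw [pvInsert_fresh_dictOf s c hc _ rfl]
        refine Prod.ext rfl ?_
        simp only [List.length_append, List.length_cons, List.length_nil]
        push_cast; ring
      rw [List.foldl_cons, h1, ih (s ++ [c]) hnd.of_cons ?_]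
      · rw [List.append_assoc]; rfl
      · intro d hd
        simp only [List.mem_append, List.mem_singleton, not_or]
        exact ⟨hfresh d (by simp [hd]), fun h => (List.nodup_cons.mp hnd).1 (h ▸ hd)⟩

-- ===== VERDICT (by name: the statement is the Claim_ definition above) =====
theorem create_char2idx_dict_spec : Claim_equal_create_char2idx_dict := by
  intro ts _ _
  show create_char2idx_dict ts = create_char2idx_dict_alt ts
  unfold create_char2idx_dict create_char2idx_dict_alt
  rw [pvBase_eq, pvOuter]
  simp only []
  rw [pvCollect_eq ts [], List.nil_append, pvSorted_eq]
  have := pvRankLoop (PySem.Set.ofList ((ts.filter (fun l => !(l == "\n"))).flatMap pvWordChars)) []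
    (PySem.Set.nodup_ofList _) (by simp)
  simp only [List.length_nil, Nat.cast_zero, add_zero, List.nil_append] at this
  rw [this, ← PySem.Set.update_nil_left]
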